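-- pv_equiv track=rewrite | github.com/Yawn-Sean/Daily_CF_Problems | daily_problems/2024/07/0708/personal_submission/cf1195d2_hum.py | f
-- ===== SOURCE A (Python) =====
-- def f(s1, s2):
--   t1 = list(reversed(s1))
--   t2 = list(reversed(s2))
--   res = []
--   i = 0
--   while i < len(t1) or i < len(t2):
--     if i < len(t1):
--       res.append(t1[i])
--     if i < len(t2):
--       res.append(t2[i])
--     i += 1
--   return int(''.join(reversed(res)))
-- ===== SOURCE B (Python) =====
-- def f(s1, s2):
--     n1, n2 = len(s1), len(s2)
--     k = min(n1, n2)
--     head = s1[:n1 - k] + s2[:n2 - k]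
--     pairs = ''.join(b + a for a, b in zip(s1[n1 - k:], s2[n2 - k:]))
--     return int(head + pairs)
-- ===== Notes on version B (the rewrite author's own statement) =====
-- stated objective: alternative
-- what changed: Replaces the two reversed lists, the index-guarded while-loop interleave and the final reversal with direct right-aligned slicing: the longer string's overhang is the head, and a single zip over the equal-length tails emits each digit pair in final order.
import Mathlib
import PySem

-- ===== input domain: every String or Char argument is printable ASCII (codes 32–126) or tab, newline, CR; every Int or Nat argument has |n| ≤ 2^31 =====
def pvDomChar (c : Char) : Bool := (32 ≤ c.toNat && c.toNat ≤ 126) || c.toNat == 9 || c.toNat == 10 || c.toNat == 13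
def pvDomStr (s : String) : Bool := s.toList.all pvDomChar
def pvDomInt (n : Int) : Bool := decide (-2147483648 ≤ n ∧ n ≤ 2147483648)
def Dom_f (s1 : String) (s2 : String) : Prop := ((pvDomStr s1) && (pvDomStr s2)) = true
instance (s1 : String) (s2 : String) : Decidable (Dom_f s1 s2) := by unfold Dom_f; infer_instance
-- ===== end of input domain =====

-- B builds the result string directly in final order (overhang slice + one zip over the
-- right-aligned tails) instead of A's reversed lists, guarded while-loop interleave and
-- final reversal; same cost, different decomposition. Return-value equivalence only.

-- ===== PORT A =====
-- the while loop: res.append(t1[i]) / res.append(t2[i]) under the in-range guards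
def interLoop (t1 t2 : List Char) (i : Nat) (res : List Char) : List Char :=
  if i < t1.length ∨ i < t2.length then
    let res1 := if i < t1.length then res ++ [t1.getD i ' '] else res
    let res2 := if i < t2.length then res1 ++ [t2.getD i ' '] else res1
    interLoop t1 t2 (i + 1) res2
  else res
termination_by max t1.length t2.length - i
decreasing_by omega

def f (s1 : String) (s2 : String) : Int :=
  let t1 := s1.toList.reverse
  let t2 := s2.toList.reverse
  let res := interLoop t1 t2 0 []
  -- int(''.join(reversed(res))); outside Pre_f Python raises ValueError (ofStr? = none)
  (PySem.Int.ofStr? (String.ofList res.reverse)).getD 0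

-- ===== PORT B =====
def f_alt (s1 : String) (s2 : String) : Int :=
  let l1 := s1.toList
  let l2 := s2.toList
  let n1 := l1.length
  let n2 := l2.length
  let k := min n1 n2
  -- s1[:n1-k] + s2[:n2-k]  (slice with a natural upper bound = take; one part is empty)
  let head := l1.take (n1 - k) ++ l2.take (n2 - k)
  -- ''.join(b + a for a, b in zip(s1[n1-k:], s2[n2-k:]))
  let pairs := ((l1.drop (n1 - k)).zip (l2.drop (n2 - k))).flatMap (fun ab => [ab.2, ab.1])
  (PySem.Int.ofStr? (String.ofList (head ++ pairs))).getD 0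

-- ===== PRECONDITION & SPEC =====
-- the digits of s2 and s1, right-aligned and pairwise interleaved, in final order
-- (an index formula, i counting positions from the right end)
def pvInterleaved (l1 l2 : List Char) : List Char :=
  (List.range (max l1.length l2.length)).reverse.flatMap (fun i =>
    (if h : i < l2.length then [l2[l2.length - 1 - i]'(by omega)] else []) ++
    (if h : i < l1.length then [l1[l1.length - 1 - i]'(by omega)] else []))

-- exactly the inputs on which Python A returns: int() succeeds on the interleaved string
-- (otherwise the final int(...) raises ValueError)
def Pre_f (s1 : String) (s2 : String) : Prop :=
  (PySem.Int.ofChars? (pvInterleaved s1.toList s2.toList)).isSome = true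
instance (s1 : String) (s2 : String) : Decidable (Pre_f s1 s2) := by unfold Pre_f; infer_instance
def pvWitness_f : String × String := ("12", "345")

def Spec_f (s1 : String) (s2 : String) (out : Int) : Prop := out = f_alt s1 s2
instance (s1 : String) (s2 : String) (out : Int) : Decidable (Spec_f s1 s2 out) := by unfold Spec_f; infer_instance

-- ===== CLAIM (what is proved, stated in full; the proofs are below) =====
def Claim_equal_f : Prop := ∀ (s1 : String) (s2 : String), Dom_f s1 s2 → Pre_f s1 s2 → Spec_f s1 s2 (f s1 s2)

-- ===== LEMMAS AND PROOFS =====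

-- pure shape of A's loop: interleave two lists, element by element, remainder appended
def inter : List Char → List Char → List Char
  | a :: u, b :: v => a :: b :: inter u v
  | [], v => v
  | u, [] => u

theorem inter_nil (u : List Char) : inter u [] = u := by
  cases u <;> rfl

theorem interLoop_eq (t1 t2 : List Char) (i : Nat) (res : List Char) :
    interLoop t1 t2 i res = res ++ inter (t1.drop i) (t2.drop i) := by
  fun_induction interLoop t1 t2 i res with
  | case1 i res h res1 res2 ih =>
      rw [ih]
      have hdrop : ∀ (l : List Char), i < l.length →
          l.drop i = l.getD i ' ' :: l.drop (i + 1) := by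
        intro l hl
        rw [List.getD_eq_getElem l ' ' hl, List.drop_eq_getElem_cons hl]
      rcases Nat.lt_or_ge i t1.length with h1 | h1 <;>
        rcases Nat.lt_or_ge i t2.length with h2 | h2
      · rw [hdrop t1 h1, hdrop t2 h2]
        simp [res2, res1, h1, h2, inter, List.getD]
      · have hn2 : ¬ i < t2.length := by omega
        rw [hdrop t1 h1, List.drop_eq_nil_of_le h2,
          List.drop_eq_nil_of_le (by omega : t2.length ≤ i + 1), inter_nil]
        simp [res2, res1, h1, hn2, List.getD]
        rw [inter_nil]
      · have hn1 : ¬ i < t1.length := by omega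
        rw [hdrop t2 h2, List.drop_eq_nil_of_le h1,
          List.drop_eq_nil_of_le (by omega : t1.length ≤ i + 1)]
        simp [res2, res1, h2, hn1, inter, List.getD]
      · exact absurd h (by omega)
  | case2 i res h =>
      rw [List.drop_eq_nil_of_le (by omega), List.drop_eq_nil_of_le (by omega)]
      simp [inter]

theorem inter_eq_zip (u v : List Char) :
    inter u v = (u.zip v).flatMap (fun ab => [ab.1, ab.2])
      ++ (u.drop (min u.length v.length) ++ v.drop (min u.length v.length)) := by
  induction u generalizing v with
  | nil => simp [inter]
  | cons a u ih =>
      cases v with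
      | nil => simp [inter]
      | cons b v => simp [inter, ih v]

theorem zip_eq_take {a b : Type} (u : List a) (v : List b) :
    u.zip v = (u.take (min u.length v.length)).zip (v.take (min u.length v.length)) := by
  induction u generalizing v with
  | nil => simp
  | cons x u ih =>
      cases v with
      | nil => simp
      | cons y v => simpa using ih v

theorem zip_reverse {a b : Type} (x : List a) (y : List b) (h : x.length = y.length) :
    (x.zip y).reverse = x.reverse.zip y.reverse := by
  induction x generalizing y with
  | nil => simp
  | cons p x ih =>
      cases y with
      | nil => simp at h
      | cons q y =>
          simp only [List.length_cons, Nat.add_right_cancel_iff] at h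
          rw [List.zip_cons_cons, List.reverse_cons, ih y h,
            List.reverse_cons, List.reverse_cons,
            List.zip_append (by simp [h])]
          rfl

theorem main_list_eq (l1 l2 : List Char) :
    (inter l1.reverse l2.reverse).reverse =
      (l1.take (l1.length - min l1.length l2.length) ++ l2.take (l2.length - min l1.length l2.length))
      ++ ((l1.drop (l1.length - min l1.length l2.length)).zip
            (l2.drop (l2.length - min l1.length l2.length))).flatMap (fun ab => [ab.2, ab.1]) := by
  set n1 := l1.length with hn1
  set n2 := l2.length with hn2
  set k := min n1 n2 with hk
  have hkr : min l1.reverse.length l2.reverse.length = k := by simp [hk, hn1, hn2]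
  rw [inter_eq_zip l1.reverse l2.reverse, hkr]
  rw [zip_eq_take l1.reverse l2.reverse, hkr]
  have htake1 : l1.reverse.take k = (l1.drop (n1 - k)).reverse := by
    rw [List.take_reverse, hn1]
  have htake2 : l2.reverse.take k = (l2.drop (n2 - k)).reverse := by
    rw [List.take_reverse, hn2]
  have hdrop1 : l1.reverse.drop k = (l1.take (n1 - k)).reverse := by
    rw [List.drop_reverse, hn1]
  have hdrop2 : l2.reverse.drop k = (l2.take (n2 - k)).reverse := by
    rw [List.drop_reverse, hn2]
  rw [htake1, htake2, hdrop1, hdrop2]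
  rw [← zip_reverse (l1.drop (n1 - k)) (l2.drop (n2 - k)) (by simp; omega)]
  rw [List.reverse_append, List.reverse_append, List.reverse_reverse]
  rw [List.reverse_flatMap, List.reverse_reverse]
  have hfun : (List.reverse ∘ fun (ab : Char × Char) => [ab.1, ab.2]) =
      (fun (ab : Char × Char) => [ab.2, ab.1]) := funext fun ab => rfl
  rw [hfun]
  simp only [List.reverse_reverse, List.append_assoc]
  rcases Nat.le_total n1 n2 with hle | hle
  · have h0 : n1 - k = 0 := by omega
    rw [h0]
    simp
  · have h0 : n2 - k = 0 := by omega
    rw [h0]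
    simp

-- ===== VERDICT (by name: the statement is the Claim_ definition above) =====
theorem f_spec : Claim_equal_f := by
  intro s1 s2 _ _
  unfold Spec_f f f_alt
  simp only []
  rw [interLoop_eq]
  simp only [List.drop_zero, List.nil_append]
  rw [main_list_eq]
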